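-- pv_equiv track=rewrite | github.com/auspayroll/evidentli | sumo/utils.py | sanitize_key
-- ===== SOURCE A (Python) =====
-- def sanitize_key(key):
-- 	"""
-- 	sanitizes for storage in mongodb
-- 	"""
-- 	sanitized = []
-- 	for i, char in enumerate(key):
-- 		if char == '.':
-- 			sanitized.append('__')
-- 		elif char != ' ' and char < '0' or char > 'z' or char == "\\":
-- 			sanitized.append('_')
-- 		else:
-- 			sanitized.append(char)
-- 	return ''.join(sanitized)
-- ===== SOURCE B (Python) =====
-- import re
--
-- _PAT = re.compile(r'[\\]|[^ 0-z]')
--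
--
-- def sanitize_key(key):
--     """sanitizes for storage in mongodb"""
--     return _PAT.sub('_', key.replace('.', '__'))
-- ===== Notes on version B (the rewrite author's own statement) =====
-- stated objective: idiomatic
-- what changed: Replaced the single per-character branch loop with two staged whole-string passes: a str.replace of dot with double underscore, then one precompiled regex substitution that maps every remaining disallowed character to underscore.
import Mathlib
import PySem

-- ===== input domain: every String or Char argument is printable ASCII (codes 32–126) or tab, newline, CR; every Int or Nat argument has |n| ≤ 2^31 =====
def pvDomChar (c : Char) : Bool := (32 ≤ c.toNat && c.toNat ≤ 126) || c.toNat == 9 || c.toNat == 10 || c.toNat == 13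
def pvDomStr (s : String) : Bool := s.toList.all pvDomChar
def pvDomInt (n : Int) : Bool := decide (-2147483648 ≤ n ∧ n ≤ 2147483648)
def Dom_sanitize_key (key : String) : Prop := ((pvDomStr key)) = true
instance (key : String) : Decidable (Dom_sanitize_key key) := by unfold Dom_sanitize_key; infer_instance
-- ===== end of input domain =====

-- B restructures A's per-character branch loop into two staged whole-string passes:
-- str.replace('.', '__') and then one regex substitution '_' for every disallowed char (idiomatic).


-- ===== PORT A =====
-- the body of A's loop: '__' for '.', '_' for disallowed, else the char itself
def pvAStep (c : Char) : List Char :=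
  if c = '.' then ['_', '_']
  else if (c ≠ ' ' ∧ c < '0') ∨ 'z' < c ∨ c = '\\' then ['_']
  else [c]

-- strings are List Char; ''.join(sanitized) is the flatten of the accumulated pieces
def sanitize_key (key : String) : String :=
  String.mk (((PySem.List.enumerate key.toList).foldl
      (fun (acc : List (List Char)) p => acc ++ [pvAStep p.2]) []).flatten)

-- ===== PORT B =====
-- pass 1: key.replace('.', '__')
def pvReplaceDot (cs : List Char) : List Char :=
  cs.flatMap (fun c => if c = '.' then ['_', '_'] else [c])

-- pass 2: the regex r'[\\]|[^ 0-z]' matches single characters: backslash, or anything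
-- outside {' '} ∪ ['0'..'z']; re.sub replaces each match with '_'.  Ported by hand,
-- exact because the pattern only ever matches one character at a time.
def pvSubChar (c : Char) : Char :=
  if c = '\\' ∨ ¬(c = ' ' ∨ ('0' ≤ c ∧ c ≤ 'z')) then '_' else c

def sanitize_key_alt (key : String) : String :=
  String.mk ((pvReplaceDot key.toList).map pvSubChar)

-- ===== PRECONDITION & SPEC =====
def Spec_sanitize_key (key : String) (out : String) : Prop := out = sanitize_key_alt key
instance (key : String) (out : String) : Decidable (Spec_sanitize_key key out) := by unfold Spec_sanitize_key; infer_instance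

-- ===== CLAIM =====
def Claim_equal_sanitize_key : Prop := ∀ (key : String), Dom_sanitize_key key → Spec_sanitize_key key (sanitize_key key)

-- ===== LEMMAS AND PROOFS =====
-- A's enumerate-fold is the map of its loop body
theorem pv_foldA (l : List Char) (s : Int) (acc : List (List Char)) :
    (PySem.List.enumerate l s).foldl (fun acc p => acc ++ [pvAStep p.2]) acc
      = acc ++ l.map pvAStep := by
  induction l generalizing s acc with
  | nil => simp [PySem.List.enumerate_nil]
  | cons x xs ih => simp [PySem.List.enumerate_cons, ih]

-- B's two passes, restricted to one character
def pvBStep (c : Char) : List Char :=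
  (if c = '.' then ['_', '_'] else [c]).map pvSubChar

-- per-code-point agreement of the two one-character actions, below 128
theorem pv_step_eq_ofNat (n : Nat) (h : n < 128) :
    pvBStep (Char.ofNat n) = pvAStep (Char.ofNat n) := by
  revert h; revert n; decide

-- rebuilding a character below 128 from its code point
theorem pv_ofNat_toNat (c : Char) (h : c.toNat < 128) : Char.ofNat c.toNat = c := by
  apply Char.ext
  rw [Char.val_ofNat (Or.inl (by omega)), Char.ofNat_toNat_eq_val]

-- per-character agreement on the domain
theorem pv_step_eq (c : Char) (h : c.toNat < 128) : pvBStep c = pvAStep c := by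
  rw [← pv_ofNat_toNat c h, pv_step_eq_ofNat _ h]

-- ===== VERDICT =====
theorem sanitize_key_spec : Claim_equal_sanitize_key := by
  intro key hdom
  unfold Spec_sanitize_key sanitize_key sanitize_key_alt pvReplaceDot
  rw [pv_foldA, List.nil_append, List.map_flatMap, List.flatten_eq_flatMap,
    List.flatMap_map]
  congr 1
  apply List.flatMap_congr
  intro c hc
  have hd := (List.all_eq_true.mp hdom) c hc
  simp [pvDomChar] at hd
  have := pv_step_eq c (by omega)
  simpa [pvBStep] using this.symm
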